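-- pv_equiv track=rewrite | github.com/andrewstring/interview-prep | exercises/palindrome/index.py | pal_list
-- ===== SOURCE A (Python) =====
-- def pal_list(count):
--     counter = 0
--
--     for val in count:
--         if val < 0:
--             return False
--         if val > 0:
--             counter += 1
--
--     if counter > 1:
--         return False
--
--     return True
-- ===== SOURCE B (Python) =====
-- def pal_list(count):
--     s = sorted(count)
--     if not s:
--         return True
--     if s[0] < 0:
--         return False
--     return len(s) < 2 or s[-2] <= 0
-- ===== Notes on version B (the rewrite author's own statement) =====
-- stated objective: alternative
-- what changed: Replaces A's accumulator loop with a sort-then-inspect algorithm: sort the list and decide everything from two cells of the sorted copy, the first (the minimum, which must be non-negative) and the second-to-last (the second largest, which must be non-positive so that at most one element is positive).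
import Mathlib
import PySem

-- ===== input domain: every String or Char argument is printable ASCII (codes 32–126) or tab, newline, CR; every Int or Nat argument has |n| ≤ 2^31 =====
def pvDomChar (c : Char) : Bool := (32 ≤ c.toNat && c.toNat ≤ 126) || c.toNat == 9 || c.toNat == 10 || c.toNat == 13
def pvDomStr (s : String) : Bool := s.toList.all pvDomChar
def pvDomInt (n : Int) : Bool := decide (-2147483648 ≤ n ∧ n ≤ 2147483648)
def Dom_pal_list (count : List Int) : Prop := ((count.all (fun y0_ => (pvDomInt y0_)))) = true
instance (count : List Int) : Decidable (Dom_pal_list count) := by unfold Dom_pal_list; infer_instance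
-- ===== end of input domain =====

-- B replaces A's accumulator loop by sort-then-inspect: sort and decide from s[0] (minimum) and s[-2] (second largest); alternative algorithm, not faster.

-- ===== PORT A =====
-- A's loop with early return on a negative, accumulating `counter` over positives.
def pal_list_loop (xs : List Int) (counter : Int) : Bool :=
  match xs with
  | [] => if counter > 1 then false else true
  | val :: rest =>
      if val < 0 then false
      else pal_list_loop rest (if val > 0 then counter + 1 else counter)

def pal_list (count : List Int) : Bool := pal_list_loop count 0

-- ===== PORT B =====
-- Source B: s = sorted(count); empty → True; s[0] < 0 → False; else len(s) < 2 or s[-2] <= 0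
def pal_list_alt (count : List Int) : Bool :=
  let s := PySem.List.sorted count (fun x => x) false
  if s.isEmpty then true
  else if PySem.List.pyGetD s 0 0 < 0 then false
  else (decide (s.length < 2) || decide (PySem.List.pyGetD s (-2) 0 ≤ 0))

-- ===== PRECONDITION & SPEC =====
def Spec_pal_list (count : List Int) (out : Bool) : Prop := out = pal_list_alt count
instance (count : List Int) (out : Bool) : Decidable (Spec_pal_list count out) := by unfold Spec_pal_list; infer_instance

-- ===== CLAIM (what is proved, stated in full; the proofs are below) =====
def Claim_equal_pal_list : Prop := ∀ (count : List Int), Dom_pal_list count → Spec_pal_list count (pal_list count)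

-- ===== LEMMAS AND PROOFS =====
-- A's loop computes: no negative anywhere, and at most one positive.
theorem pal_list_loop_eq (xs : List Int) (c : Int) :
    pal_list_loop xs c =
      (if xs.any (fun v => v < 0) then false
       else decide (c + ((xs.filter (fun v => v > 0)).length : Int) ≤ 1)) := by
  induction xs generalizing c with
  | nil =>
      simp only [pal_list_loop, List.any_nil, List.filter_nil, List.length_nil]
      by_cases h : c > 1
      · simp [h]
      · simp [h]
        omega
  | cons v rest ih =>
      simp only [pal_list_loop, List.any_cons, List.filter_cons]
      by_cases hneg : v < 0
      · simp [hneg]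
      · by_cases hpos : v > 0
        · simp only [hneg, hpos, ih, if_true, if_false, decide_true, decide_false,
            Bool.false_or, List.length_cons]
          by_cases hany : rest.any (fun v => v < 0)
          · simp [hany]
          · simp only [hany, if_false, Bool.false_eq_true]
            rw [decide_eq_decide]
            push_cast
            omega
        · simp [hneg, hpos, ih]

-- In a sorted (pairwise ≤) list of length ≥ 2, the second-to-last cell is ≤ 0
-- iff the list holds at most one positive element.
theorem sorted_snd_last_iff (s : List Int) (hp : s.Pairwise (· ≤ ·)) (hlen : 2 ≤ s.length) :
    (s[s.length - 2]'(by omega) ≤ 0 ↔ (s.filter (fun v => v > 0)).length ≤ 1) := by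
  have hmono : ∀ i j (hi : i < s.length) (hj : j < s.length), i ≤ j → s[i] ≤ s[j] := by
    intro i j hi hj hij
    rcases Nat.lt_or_eq_of_le hij with h | h
    · exact (List.pairwise_iff_getElem.mp hp) i j hi hj h
    · subst h; exact le_refl _
  constructor
  · intro h
    have hsplit : s = s.take (s.length - 1) ++ s.drop (s.length - 1) := (List.take_append_drop _ _).symm
    have h1 : (s.take (s.length - 1)).filter (fun v => v > 0) = [] := by
      rw [List.filter_eq_nil_iff]
      intro a ha
      obtain ⟨i, hi, rfl⟩ := List.mem_take_iff_getElem.mp ha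
      have : s[i] ≤ s[s.length - 2]'(by omega) := by
        apply hmono i (s.length - 2) (by omega) (by omega)
        simp only [lt_min_iff] at hi
        omega
      simp only [decide_eq_true_eq]
      omega
    have h2 : ((s.drop (s.length - 1)).filter (fun v => v > 0)).length ≤ 1 := by
      calc ((s.drop (s.length - 1)).filter (fun v => v > 0)).length
          ≤ (s.drop (s.length - 1)).length := List.length_filter_le _ _
        _ = 1 := by rw [List.length_drop]; omega
    conv_lhs => rw [hsplit]
    rw [List.filter_append, List.length_append, h1]
    simp only [List.length_nil, Nat.zero_add]
    exact h2
  · intro h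
    by_contra hpos
    rw [not_le] at hpos
    have hddrop : (s.drop (s.length - 2)).filter (fun v => v > 0) = s.drop (s.length - 2) := by
      rw [List.filter_eq_self]
      intro a ha
      obtain ⟨i, hi, rfl⟩ := List.getElem_of_mem ha
      rw [List.getElem_drop]
      simp only [decide_eq_true_eq]
      have hle : s[s.length - 2]'(by omega) ≤ s[s.length - 2 + i]'(by
          rw [List.length_drop] at hi; omega) :=
        hmono (s.length - 2) (s.length - 2 + i) (by omega)
          (by rw [List.length_drop] at hi; omega) (by omega)
      omega
    have hge : 2 ≤ (s.filter (fun v => v > 0)).length := by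
      calc 2 = (s.drop (s.length - 2)).length := by rw [List.length_drop]; omega
        _ = ((s.drop (s.length - 2)).filter (fun v => v > 0)).length := by rw [hddrop]
        _ ≤ (s.filter (fun v => v > 0)).length :=
            ((List.drop_sublist _ _).filter _).length_le
    omega

-- B's post-sort check equals A's two conditions, on any pairwise-≤ list.
theorem check_eq (s : List Int) (hp : s.Pairwise (· ≤ ·)) :
    (if s.any (fun v => v < 0) then false
     else decide (((s.filter (fun v => v > 0)).length : Int) ≤ 1)) =
    (if s.isEmpty then true
     else if PySem.List.pyGetD s 0 0 < 0 then false
     else (decide (s.length < 2) || decide (PySem.List.pyGetD s (-2) 0 ≤ 0))) := by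
  match s, hp with
  | [], _ => simp
  | m :: t, hp =>
      have hmin : ∀ y ∈ m :: t, m ≤ y := by
        intro y hy
        rcases List.mem_cons.mp hy with rfl | hy'
        · exact le_refl _
        · exact List.rel_of_pairwise_cons hp hy'
      simp only [List.isEmpty_cons, if_false, Bool.false_eq_true, PySem.List.pyGetD_zero_cons]
      by_cases hneg : m < 0
      · have hany : (m :: t).any (fun v => v < 0) = true := by
          simp only [List.any_cons, Bool.or_eq_true, decide_eq_true_eq]; left; exact hneg
        simp [hneg, hany]
      · have hnoneg : (m :: t).any (fun v => v < 0) = false := by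
          simp only [List.any_eq_false, decide_eq_true_eq, not_lt]
          intro y hy
          exact le_trans (by omega) (hmin y hy)
        simp only [hnoneg, if_false, hneg, Bool.false_eq_true]
        by_cases hlen : (m :: t).length < 2
        · have ht : t = [] := by
            simp only [List.length_cons] at hlen
            exact List.eq_nil_of_length_eq_zero (by omega)
          subst ht
          simp only [hlen, decide_true, Bool.true_or]
          simp only [List.filter_cons, List.filter_nil]
          by_cases hp0 : m > 0 <;> simp [hp0]
        · have hlen2 : 2 ≤ (m :: t).length := by omega
          have hidx : PySem.List.pyGetD (m :: t) (-2) 0 = (m :: t)[(m :: t).length - 2]'(by omega) :=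
            PySem.List.pyGetD_neg_ofNat (m :: t) 2 0 (by omega) (by omega)
          rw [hidx]
          simp only [hlen, decide_false, Bool.false_or]
          have H := sorted_snd_last_iff (m :: t) hp hlen2
          rw [decide_eq_decide]
          constructor
          · intro hh; exact H.mpr (by exact_mod_cast hh)
          · intro hh; exact_mod_cast H.mp hh

-- ===== VERDICT (by name: the statement is the Claim_ definition above) =====
theorem pal_list_spec : Claim_equal_pal_list := by
  intro count _
  unfold Spec_pal_list pal_list pal_list_alt
  rw [pal_list_loop_eq]
  have hperm : (PySem.List.sorted count (fun x => x) false).Perm count :=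
    PySem.List.sorted_perm count (fun x => x) false
  have hp : (PySem.List.sorted count (fun x => x) false).Pairwise (· ≤ ·) := by
    simpa using PySem.List.sorted_pairwise count (fun x => x)
  rw [show count.any (fun v => v < 0)
        = (PySem.List.sorted count (fun x => x) false).any (fun v => v < 0) from
      (List.Perm.any_eq hperm).symm,
    show (count.filter (fun v => v > 0)).length
        = ((PySem.List.sorted count (fun x => x) false).filter (fun v => v > 0)).length from
      (List.Perm.length_eq (hperm.filter _)).symm]
  simp only [zero_add]
  exact check_eq _ hp
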